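-- pv_equiv track=rewrite | github.com/kavat/cuckoo3 | processing/cuckoo/processing/static/sevenzip.py | prendi_tutti_contesti
-- ===== SOURCE A (Python) =====
-- def prendi_tutti_contesti(testo, sottostringa, n):
--   risultati = []
--   start = 0
--   while True:
--     idx = testo.find(sottostringa, start)
--     if idx == -1:
--       break
--     inizio = max(0, idx - n)
--     fine = min(len(testo), idx + len(sottostringa) + n)
--     risultati.append(testo[inizio:fine])
--     start = idx + 1 # continua a cercare dopo l'occorrenza trovata
--   return risultati
-- ===== SOURCE B (Python) =====
-- def prendi_tutti_contesti(testo, sottostringa, n):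
--   L = len(testo)
--   m = len(sottostringa)
--   risultati = []
--   for idx in range(L + 1):
--     if testo.startswith(sottostringa, idx):
--       risultati.append(testo[max(0, idx - n):min(L, idx + m + n)])
--   return risultati
-- ===== Notes on version B (the rewrite author's own statement) =====
-- stated objective: alternative
-- what changed: Replaces the while/str.find search loop (jumping from one found occurrence to the next) with a single positional scan over every index 0..len(testo) that tests startswith at each position and appends the context window there.
import Mathlib
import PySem

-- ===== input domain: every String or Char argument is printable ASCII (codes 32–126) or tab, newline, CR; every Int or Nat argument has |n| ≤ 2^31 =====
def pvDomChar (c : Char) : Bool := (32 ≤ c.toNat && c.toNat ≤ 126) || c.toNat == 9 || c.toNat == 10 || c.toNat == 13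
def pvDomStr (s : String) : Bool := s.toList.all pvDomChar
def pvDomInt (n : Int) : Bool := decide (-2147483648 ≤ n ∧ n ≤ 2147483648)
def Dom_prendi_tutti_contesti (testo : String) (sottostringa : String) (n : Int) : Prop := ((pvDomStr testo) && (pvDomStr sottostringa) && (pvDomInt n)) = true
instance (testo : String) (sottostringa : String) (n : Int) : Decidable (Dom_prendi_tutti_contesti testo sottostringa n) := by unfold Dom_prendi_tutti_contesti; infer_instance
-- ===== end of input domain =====

-- B replaces A's while/str.find jump-to-next-occurrence loop with one positional scan testing
-- startswith at every index 0..len(testo); same return value, no speed claim (objective: alternative).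

-- ===== PORT A =====
-- context window testo[max(0, idx-n) : min(len(testo), idx+len(sottostringa)+n)] (shared formula of both ports)
def pvCtx (s sub : List Char) (n : Int) (idx : Int) : List Char :=
  PySem.List.slice s (some (max 0 (idx - n))) (some (min (s.length : Int) (idx + (sub.length : Int) + n)))

-- findFrom with a start past the end returns -1 (CPython quirk; used for A's loop termination)
theorem pvFindFrom_gt (s sub : List Char) (k : Nat) (h : s.length < k) :
    PySem.Chars.findFrom s sub (k : Int) none = -1 := by
  unfold PySem.Chars.findFrom
  have h1 : ¬ ((k : Int) < 0) := by omega
  simp only [h1, if_false]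
  rw [if_pos (by exact_mod_cast h)]

-- a successful findFrom lands between start and len (used for termination and for the main lemma)
theorem pvFindFrom_bound (s sub : List Char) (k : Nat)
    (h : PySem.Chars.findFrom s sub (k : Int) none ≠ -1) :
    k ≤ s.length ∧ (k : Int) ≤ PySem.Chars.findFrom s sub (k : Int) none ∧
      PySem.Chars.findFrom s sub (k : Int) none ≤ (s.length : Int) := by
  have hk : k ≤ s.length := by
    by_contra hgt
    exact h (pvFindFrom_gt s sub k (by omega))
  refine ⟨hk, (PySem.Chars.findFrom_natCast_spec s sub k hk h).1, ?_⟩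
  rw [PySem.Chars.findFrom_natCast s sub k hk] at h ⊢
  by_cases hf : PySem.Chars.find (s.drop k) sub = -1
  · simp [hf] at h
  · have h1 := PySem.Chars.find_le_length (s.drop k) sub
    simp only [List.length_drop] at h1
    simp only [hf, if_false]
    omega

-- A's while loop: find the next occurrence from `start`, emit its context, restart at idx+1
def pvLoopA (s sub : List Char) (n : Int) (start : Nat) : List (List Char) :=
  let idx := PySem.Chars.findFrom s sub (start : Int) none
  if h : idx = -1 then []
  else pvCtx s sub n idx :: pvLoopA s sub n (idx.toNat + 1)
termination_by s.length + 1 - start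
decreasing_by
  have hb := pvFindFrom_bound s sub start h
  omega

def prendi_tutti_contesti (testo : String) (sottostringa : String) (n : Int) : List String :=
  (pvLoopA testo.toList sottostringa.toList n 0).map String.ofList

-- ===== PORT B =====
def prendi_tutti_contesti_alt (testo : String) (sottostringa : String) (n : Int) : List String :=
  (PySem.List.pyRange 0 ((testo.toList.length : Int) + 1) 1).foldl
    (fun acc idx =>
      if PySem.Chars.startswith (testo.toList.drop idx.toNat) sottostringa.toList then
        acc ++ [String.ofList (pvCtx testo.toList sottostringa.toList n idx)]
      else acc) []

-- ===== PRECONDITION & SPEC =====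
def Spec_prendi_tutti_contesti (testo : String) (sottostringa : String) (n : Int) (out : List String) : Prop := out = prendi_tutti_contesti_alt testo sottostringa n
instance (testo : String) (sottostringa : String) (n : Int) (out : List String) : Decidable (Spec_prendi_tutti_contesti testo sottostringa n out) := by unfold Spec_prendi_tutti_contesti; infer_instance

-- ===== CLAIM (what is proved, stated in full; the proofs are below) =====
def Claim_equal_prendi_tutti_contesti : Prop := ∀ (testo : String) (sottostringa : String) (n : Int), Dom_prendi_tutti_contesti testo sottostringa n → Spec_prendi_tutti_contesti testo sottostringa n (prendi_tutti_contesti testo sottostringa n)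

-- ===== LEMMAS AND PROOFS =====

-- a prefix at position i ≥ k is an infix of the suffix from k
theorem pvPrefix_infix (s sub : List Char) (k i : Nat) (hk : k ≤ i)
    (h : sub <+: s.drop i) : sub <:+: s.drop k := by
  have : s.drop i = (s.drop k).drop (i - k) := by
    rw [List.drop_drop]; congr 1; omega
  rw [this] at h
  exact h.isInfix.trans (List.drop_suffix (i - k) (s.drop k)).isInfix

-- A's loop from `start` is exactly the filtered positional scan over start..len
theorem pvLoopA_eq (s sub : List Char) (n : Int) :
    ∀ (d start : Nat), start ≤ s.length + 1 → s.length + 1 - start ≤ d →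
    pvLoopA s sub n start =
      ((PySem.List.pyRange (start : Int) ((s.length : Int) + 1) 1).filter
        (fun i => PySem.Chars.startswith (s.drop i.toNat) sub)).map (pvCtx s sub n) := by
  intro d
  induction d with
  | zero =>
    intro start h1 h2
    have hs : start = s.length + 1 := by omega
    subst hs
    rw [pvLoopA, dif_pos (pvFindFrom_gt s sub (s.length + 1) (by omega))]
    rw [PySem.List.pyRange_one_eq_nil (by push_cast; omega)]
    simp
  | succ d ih =>
    intro start h1 h2
    rw [pvLoopA]
    by_cases h : PySem.Chars.findFrom s sub (start : Int) none = -1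
    · rw [dif_pos h]
      symm
      rw [List.map_eq_nil_iff, List.filter_eq_nil_iff]
      intro i hi
      have hib := PySem.List.mem_pyRange_one.mp hi
      simp only [Bool.not_eq_true]
      rw [← Bool.not_eq_true, PySem.Chars.startswith_iff]
      intro hpre
      by_cases hst : start ≤ s.length
      · have hno := (PySem.Chars.findFrom_natCast_eq_neg_one_iff s sub start hst).mp h
        exact hno (pvPrefix_infix s sub start i.toNat (by omega) hpre)
      · omega
    · have hb := pvFindFrom_bound s sub start h
      set idx := PySem.Chars.findFrom s sub (start : Int) none with hidx
      have hspec := PySem.Chars.findFrom_natCast_spec s sub start hb.1 h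
      rw [dif_neg h]
      have hidx0 : (0 : Int) ≤ idx := by omega
      have hIdxNat : (idx.toNat : Int) = idx := Int.toNat_of_nonneg hidx0
      -- split the range at idx and idx+1
      rw [PySem.List.pyRange_one_append (start : Int) idx ((s.length : Int) + 1) (by omega) (by omega),
          PySem.List.pyRange_one_append idx (idx + 1) ((s.length : Int) + 1) (by omega) (by omega),
          PySem.List.pyRange_one_singleton]
      rw [List.filter_append, List.filter_append, List.map_append, List.map_append]
      -- no matches strictly before idx
      have hpre_nil : (PySem.List.pyRange (start : Int) idx 1).filter
          (fun i => PySem.Chars.startswith (s.drop i.toNat) sub) = [] := by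
        rw [List.filter_eq_nil_iff]
        intro i hi
        have hib := PySem.List.mem_pyRange_one.mp hi
        simp only [Bool.not_eq_true]
        rw [← Bool.not_eq_true, PySem.Chars.startswith_iff]
        intro hpre
        exact hspec.2.2 i.toNat (by omega) (by omega) hpre
      -- a match at idx
      have hmatch : ([idx].filter (fun i => PySem.Chars.startswith (s.drop i.toNat) sub)) = [idx] := by
        simp only [List.filter_cons, List.filter_nil]
        rw [if_pos (by rw [PySem.Chars.startswith_iff]; exact hspec.2.1)]
      rw [hpre_nil, hmatch]
      have hrec := ih (idx.toNat + 1) (by omega) (by omega)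
      have hcast : ((idx.toNat + 1 : Nat) : Int) = idx + 1 := by omega
      rw [hcast] at hrec
      rw [← hrec]
      simp
-- ===== VERDICT (by name: the statement is the Claim_ definition above) =====
theorem prendi_tutti_contesti_spec : Claim_equal_prendi_tutti_contesti := by
  intro testo sottostringa n _
  unfold Spec_prendi_tutti_contesti prendi_tutti_contesti prendi_tutti_contesti_alt
  rw [PySem.List.foldl_append_if
        (fun idx => PySem.Chars.startswith (testo.toList.drop idx.toNat) sottostringa.toList)
        (fun idx => String.ofList (pvCtx testo.toList sottostringa.toList n idx))]
  rw [pvLoopA_eq testo.toList sottostringa.toList n (testo.toList.length + 1) 0 (by omega) (by omega)]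
  simp [List.map_map, Function.comp_def]
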